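-- pv_equiv track=rewrite | github.com/shovan777/algorithm_basics | sorting/multiway_merge.py | oneStepKWayMerge
-- ===== SOURCE A (Python) =====
-- def twoWayMerge(lst1, lst2):
--     # Time complexity: O(n+m) where n is the length of lst1 and m is the length of lst2
--     # Analysis
--     # ---------
--
--     # Implement the two way merge algorithm on
--     #          two ascending order sorted lists
--     # return a fresh ascending order sorted list that
--     #          merges lst1 and lst2
--     # your code here
--     pt1, pt2 = 0,0
--     merged_list = []
--     len_merged_list = len(lst1) + len(lst2)
--     while (pt1 < len(lst1)) and (pt2 < len(lst2)):
--         if lst1[pt1] <= lst2[pt2]: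
--             merged_list.append(lst1[pt1])
--             pt1 += 1
--         else:
--             merged_list.append(lst2[pt2])
--             pt2 += 1
--     if pt1 < len(lst1):
--         merged_list.extend(lst1[pt1:])
--     if pt2 < len(lst2):
--         merged_list.extend(lst2[pt2:])
--     return merged_list
--
-- def oneStepKWayMerge(list_of_lists):
--     # Time complexity: O(n*k^2) where n is the total number of elements in all the lists
--     # and k is the number of lists in list_of_lists
--     # Analysis
--     # the running time of two way merge is $\theta(n+m)$
--
--     # now, we perform this k times so the total run time is
--
--     # first we have
--     # list is empty first so
--
--     # ((n+n))= 2n we do this at 1 step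
--
--     # 2n + n = 3n at 2 step
--
--     # ...
--
--     # (k-1)n at k step
--
--     # n(2+3+..+k-1) = $\theta(n*(k^`2-1))$ = O(n*k^2)
--     if (len(list_of_lists) <= 1):
--         return list_of_lists
--     ret_list_of_lists = []
--     k = len(list_of_lists)
--     for i in range(0, k, 2):
--         if (i < k-1):
--             ret_list_of_lists.append(twoWayMerge(list_of_lists[i], list_of_lists[i+1]))
--         else:
--             ret_list_of_lists.append(list_of_lists[k-1])
--     return ret_list_of_lists
-- ===== SOURCE B (Python) =====
-- def _merge(lst1, lst2):
--     # consume the two lists from the front, moving the smaller head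
--     # (lst1 wins ties) into the output; remainders are appended at the end
--     s1 = list(lst1)
--     s2 = list(lst2)
--     out = []
--     while s1 and s2:
--         out.append(s1.pop(0) if s1[0] <= s2[0] else s2.pop(0))
--     return out + s1 + s2
--
-- def oneStepKWayMerge(list_of_lists):
--     if len(list_of_lists) <= 1:
--         return list_of_lists
--     out = []
--     rest = list_of_lists
--     while len(rest) >= 2:
--         out.append(_merge(rest[0], rest[1]))
--         rest = rest[2:]
--     out.extend(rest)
--     return out
-- ===== Notes on version B (the rewrite author's own statement) =====
-- stated objective: alternative
-- what changed: Replaces A's index-pointer two-way merge and range(0,k,2) index loop with list-consuming traversals: a merge that pops the smaller head off the front of working copies of the two lists, and an outer loop that slices two lists off the front per step.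
import Mathlib
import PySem

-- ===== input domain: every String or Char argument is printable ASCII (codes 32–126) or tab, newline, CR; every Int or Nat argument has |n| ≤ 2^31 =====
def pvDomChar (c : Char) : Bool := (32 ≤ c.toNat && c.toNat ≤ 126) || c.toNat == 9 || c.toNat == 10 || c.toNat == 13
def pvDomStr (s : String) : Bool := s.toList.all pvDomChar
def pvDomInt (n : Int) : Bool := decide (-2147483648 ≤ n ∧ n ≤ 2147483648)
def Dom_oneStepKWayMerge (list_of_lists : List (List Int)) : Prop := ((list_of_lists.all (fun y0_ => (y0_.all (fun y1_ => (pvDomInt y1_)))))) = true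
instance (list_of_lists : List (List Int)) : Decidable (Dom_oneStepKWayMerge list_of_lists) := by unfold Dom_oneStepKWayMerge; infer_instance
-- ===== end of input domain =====

-- B replaces A's index-pointer two-way merge and range(0,k,2) index loop by list-consuming
-- traversals (pop-from-front merge, two lists sliced off per step); objective: alternative, not faster.

-- ===== PORT A =====
-- while (pt1 < len(lst1)) and (pt2 < len(lst2)): … ; then the two `extend` tails.
-- (fuel only makes the while-loop total; lst1.length + lst2.length steps always suffice)
def twoWayMergeLoop (lst1 lst2 : List Int) : Nat → Int → Int → List Int → List Int
  | 0, _, _, merged => merged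
  | fuel + 1, pt1, pt2, merged =>
    if pt1 < (lst1.length : Int) ∧ pt2 < (lst2.length : Int) then
      if PySem.List.pyGetD lst1 pt1 0 ≤ PySem.List.pyGetD lst2 pt2 0 then
        twoWayMergeLoop lst1 lst2 fuel (pt1 + 1) pt2 (merged ++ [PySem.List.pyGetD lst1 pt1 0])
      else
        twoWayMergeLoop lst1 lst2 fuel pt1 (pt2 + 1) (merged ++ [PySem.List.pyGetD lst2 pt2 0])
    else
      let m1 := if pt1 < (lst1.length : Int) then merged ++ PySem.List.slice lst1 (some pt1) none else merged
      if pt2 < (lst2.length : Int) then m1 ++ PySem.List.slice lst2 (some pt2) none else m1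

def twoWayMerge (lst1 lst2 : List Int) : List Int :=
  twoWayMergeLoop lst1 lst2 (lst1.length + lst2.length) 0 0 []

def oneStepKWayMerge (list_of_lists : List (List Int)) : List (List Int) :=
  if list_of_lists.length ≤ 1 then list_of_lists
  else
    let k : Int := list_of_lists.length
    (PySem.List.pyRange 0 k 2).foldl
      (fun acc i =>
        if i < k - 1 then
          acc ++ [twoWayMerge (PySem.List.pyGetD list_of_lists i []) (PySem.List.pyGetD list_of_lists (i + 1) [])]
        else
          acc ++ [PySem.List.pyGetD list_of_lists (k - 1) []])
      []

-- ===== PORT B =====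
-- while s1 and s2: out.append(s1.pop(0) if s1[0] <= s2[0] else s2.pop(0)); return out + s1 + s2
-- (fuel only makes the while-loop total; one element is consumed per step)
def mergeLoop : Nat → List Int → List Int → List Int → List Int
  | fuel + 1, a :: s1, b :: s2, out =>
      if a ≤ b then mergeLoop fuel s1 (b :: s2) (out ++ [a])
      else mergeLoop fuel (a :: s1) s2 (out ++ [b])
  | _, s1, s2, out => out ++ s1 ++ s2

def pyMerge (lst1 lst2 : List Int) : List Int :=
  mergeLoop (lst1.length + lst2.length) lst1 lst2 []

-- while len(rest) >= 2: out.append(_merge(rest[0], rest[1])); rest = rest[2:]; out.extend(rest)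
def pairLoop (out : List (List Int)) : List (List Int) → List (List Int)
  | a :: b :: rest => pairLoop (out ++ [pyMerge a b]) rest
  | rest => out ++ rest

def oneStepKWayMerge_alt (list_of_lists : List (List Int)) : List (List Int) :=
  if list_of_lists.length ≤ 1 then list_of_lists
  else pairLoop [] list_of_lists

-- ===== PRECONDITION & SPEC =====
def Spec_oneStepKWayMerge (list_of_lists : List (List Int)) (out : List (List Int)) : Prop := out = oneStepKWayMerge_alt list_of_lists
instance (list_of_lists : List (List Int)) (out : List (List Int)) : Decidable (Spec_oneStepKWayMerge list_of_lists out) := by unfold Spec_oneStepKWayMerge; infer_instance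

-- ===== CLAIM (what is proved, stated in full; the proofs are below) =====
def Claim_equal_oneStepKWayMerge : Prop := ∀ (list_of_lists : List (List Int)), Dom_oneStepKWayMerge list_of_lists → Spec_oneStepKWayMerge list_of_lists (oneStepKWayMerge list_of_lists)

-- ===== LEMMAS AND PROOFS =====

-- A's pointer loop computes B's list-consuming merge of the unread suffixes (same fuel on both sides).
theorem twoWayMergeLoop_eq_mergeLoop (lst1 lst2 : List Int) :
    ∀ (fuel : Nat) (pt1 pt2 : Int) (merged : List Int), 0 ≤ pt1 → 0 ≤ pt2 →
      ((lst1.length : Int) - pt1).toNat + ((lst2.length : Int) - pt2).toNat ≤ fuel →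
      twoWayMergeLoop lst1 lst2 fuel pt1 pt2 merged
        = mergeLoop fuel (lst1.drop pt1.toNat) (lst2.drop pt2.toNat) merged := by
  intro fuel
  induction fuel with
  | zero =>
    intro pt1 pt2 merged h1 h2 hb
    have hd1 : lst1.drop pt1.toNat = [] := List.drop_eq_nil_of_le (by omega)
    have hd2 : lst2.drop pt2.toNat = [] := List.drop_eq_nil_of_le (by omega)
    simp [twoWayMergeLoop, mergeLoop, hd1, hd2]
  | succ fuel ih =>
    intro pt1 pt2 merged h1 h2 hb
    rw [twoWayMergeLoop]
    by_cases h : pt1 < (lst1.length : Int) ∧ pt2 < (lst2.length : Int)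
    · rw [if_pos h]
      have hp1 : pt1.toNat < lst1.length := by omega
      have hp2 : pt2.toNat < lst2.length := by omega
      rw [List.drop_eq_getElem_cons hp1, List.drop_eq_getElem_cons hp2]
      have he1 : PySem.List.pyGetD lst1 pt1 0 = lst1[pt1.toNat] :=
        PySem.List.pyGetD_eq_getElem lst1 0 h1 h.1
      have he2 : PySem.List.pyGetD lst2 pt2 0 = lst2[pt2.toNat] :=
        PySem.List.pyGetD_eq_getElem lst2 0 h2 h.2
      rw [mergeLoop, he1, he2]
      have ht1 : (pt1 + 1).toNat = pt1.toNat + 1 := by omega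
      have ht2 : (pt2 + 1).toNat = pt2.toNat + 1 := by omega
      by_cases hle : lst1[pt1.toNat] ≤ lst2[pt2.toNat]
      · rw [if_pos hle, if_pos hle, ih (pt1 + 1) pt2 _ (by omega) h2 (by omega), ht1,
          ← List.drop_eq_getElem_cons hp2]
      · rw [if_neg hle, if_neg hle, ih pt1 (pt2 + 1) _ h1 (by omega) (by omega), ht2,
          ← List.drop_eq_getElem_cons hp1]
    · rw [if_neg h]
      by_cases hc1 : pt1 < (lst1.length : Int)
      · have hc2 : ¬ pt2 < (lst2.length : Int) := fun hc2 => h ⟨hc1, hc2⟩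
        have hd2 : lst2.drop pt2.toNat = [] := List.drop_eq_nil_of_le (by omega)
        simp only [if_pos hc1, if_neg hc2, hd2, PySem.List.slice_from lst1 h1]
        cases lst1.drop pt1.toNat <;> simp [mergeLoop]
      · have hd1 : lst1.drop pt1.toNat = [] := List.drop_eq_nil_of_le (by omega)
        simp only [if_neg hc1, hd1]
        by_cases hc2 : pt2 < (lst2.length : Int)
        · simp only [if_pos hc2, PySem.List.slice_from lst2 h2]
          simp [mergeLoop]
        · have hd2 : lst2.drop pt2.toNat = [] := List.drop_eq_nil_of_le (by omega)
          simp only [if_neg hc2, hd2]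
          simp [mergeLoop]

theorem twoWayMerge_eq (lst1 lst2 : List Int) : twoWayMerge lst1 lst2 = pyMerge lst1 lst2 := by
  rw [twoWayMerge, pyMerge,
    twoWayMergeLoop_eq_mergeLoop lst1 lst2 (lst1.length + lst2.length) 0 0 [] le_rfl le_rfl (by omega)]
  simp

theorem foldl_ite_append {α : Type} (c : α → Prop) [DecidablePred c] (u v : α → List (List Int))
    (l : List α) (acc : List (List Int)) :
    l.foldl (fun acc i => if c i then acc ++ u i else acc ++ v i) acc
      = acc ++ l.flatMap (fun i => if c i then u i else v i) := by
  induction l generalizing acc with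
  | nil => simp
  | cons x xs ih => simp only [List.foldl_cons, List.flatMap_cons, ih]; split <;> simp

theorem pairLoop_prefix : ∀ (l out : List (List Int)), pairLoop out l = out ++ pairLoop [] l
  | a :: b :: rest, out => by
      rw [pairLoop, pairLoop, pairLoop_prefix rest (out ++ [pyMerge a b]),
        pairLoop_prefix rest ([] ++ [pyMerge a b])]
      simp
  | [], out => by simp [pairLoop]
  | [x], out => by simp [pairLoop]

theorem pyRange_two_cons {a b : Int} (h : a < b) :
    PySem.List.pyRange a b 2 = a :: PySem.List.pyRange (a + 2) b 2 := by
  rw [PySem.List.pyRange_of_pos a b (by norm_num), PySem.List.pyRange_of_pos (a + 2) b (by norm_num)]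
  have hn : (if a < b then ((b - a + 2 - 1) / 2).toNat else 0)
      = (if a + 2 < b then ((b - (a + 2) + 2 - 1) / 2).toNat else 0) + 1 := by
    split_ifs <;> omega
  rw [hn, List.range_succ_eq_map, List.map_cons, List.map_map]
  refine congrArg₂ List.cons (by push_cast; ring) ?_
  exact List.map_congr_left (fun k _ => by simp [Function.comp]; ring)

theorem pyRange_two_shift (k : Int) :
    PySem.List.pyRange 2 k 2 = (PySem.List.pyRange 0 (k - 2) 2).map (· + 2) := by
  rw [PySem.List.pyRange_of_pos 2 k (by norm_num), PySem.List.pyRange_of_pos 0 (k - 2) (by norm_num),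
    List.map_map]
  have hn : (if (2:Int) < k then ((k - 2 + 2 - 1) / 2).toNat else 0)
      = (if (0:Int) < k - 2 then ((k - 2 - 0 + 2 - 1) / 2).toNat else 0) := by
    split_ifs <;> omega
  rw [hn]
  exact List.map_congr_left (fun j _ => by simp [Function.comp]; ring)

def gA (L : List (List Int)) : Int → List (List Int) := fun i =>
  if i < (L.length : Int) - 1 then
    [twoWayMerge (PySem.List.pyGetD L i []) (PySem.List.pyGetD L (i + 1) [])]
  else
    [PySem.List.pyGetD L ((L.length : Int) - 1) []]

theorem outer_eq : ∀ (L : List (List Int)),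
    (PySem.List.pyRange 0 (L.length : Int) 2).flatMap (gA L) = pairLoop [] L
  | [] => by decide
  | [x] => by
      have h1 : PySem.List.pyRange 0 (1 : Int) 2 = [0] := by decide
      simp only [List.length_singleton, Int.natCast_one, h1]
      simp [gA, pairLoop, PySem.List.pyGetD]
  | a :: b :: rest => by
      have hk : ((a :: b :: rest).length : Int) = (rest.length : Int) + 2 := by simp; ring
      have hcons : PySem.List.pyRange 0 ((a :: b :: rest).length : Int) 2
          = 0 :: PySem.List.pyRange 2 ((a :: b :: rest).length : Int) 2 := by
        rw [pyRange_two_cons (by rw [hk]; omega)]; norm_num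
      rw [hcons, List.flatMap_cons, pyRange_two_shift, List.flatMap_map]
      have hg0 : gA (a :: b :: rest) 0 = [pyMerge a b] := by
        rw [gA]
        rw [if_pos (by rw [hk]; omega)]
        simp [PySem.List.pyGetD, twoWayMerge_eq]
      have hshift : ∀ j ∈ PySem.List.pyRange 0 (((a :: b :: rest).length : Int) - 2) 2,
          (fun j => gA (a :: b :: rest) (j + 2)) j = gA rest j := by
        intro j hj
        have hj' := (PySem.List.mem_pyRange_iff_of_pos (by norm_num) j).mp hj
        obtain ⟨hj0, hjlt, -⟩ := hj'
        have ht2 : (j + 2).toNat = j.toNat + 2 := by omega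
        have ht3 : (j + 2 + 1).toNat = (j + 1).toNat + 2 := by omega
        simp only [gA]
        have hcond : (j + 2 < ((a :: b :: rest).length : Int) - 1) ↔ (j < (rest.length : Int) - 1) := by
          rw [hk]; omega
        by_cases hc : j < (rest.length : Int) - 1
        · rw [if_pos (hcond.mpr hc), if_pos hc]
          rw [PySem.List.pyGetD_of_nonneg _ _ (by omega), PySem.List.pyGetD_of_nonneg _ _ (by omega),
            PySem.List.pyGetD_of_nonneg _ _ (by omega), PySem.List.pyGetD_of_nonneg _ _ (by omega),
            ht2, ht3]
          have hj1 : (j + 1).toNat = j.toNat + 1 := by omega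
          simp [hj1]
        · rw [if_neg (fun hx => hc (hcond.mp hx)), if_neg hc]
          have hke : (((a :: b :: rest).length : Int) - 1).toNat = ((rest.length : Int) - 1).toNat + 2 := by
            rw [hk]; omega
          rw [PySem.List.pyGetD_of_nonneg _ _ (by rw [hk]; omega),
            PySem.List.pyGetD_of_nonneg _ _ (by omega), hke]
          simp
      have hlen : ((a :: b :: rest).length : Int) - 2 = (rest.length : Int) := by rw [hk]; ring
      rw [hlen] at hshift
      have hfm : List.flatMap (fun j => gA (a :: b :: rest) (j + 2))
            (PySem.List.pyRange 0 ((rest.length : Int)) 2)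
          = List.flatMap (gA rest) (PySem.List.pyRange 0 ((rest.length : Int)) 2) := by
        simp only [List.flatMap_def]
        rw [List.map_congr_left hshift]
      rw [hlen, hg0, hfm, outer_eq rest, pairLoop,
        pairLoop_prefix rest ([] ++ [pyMerge a b])]
      simp

theorem main_eq (L : List (List Int)) : oneStepKWayMerge L = oneStepKWayMerge_alt L := by
  unfold oneStepKWayMerge oneStepKWayMerge_alt
  split
  · rfl
  · rw [foldl_ite_append, List.nil_append, ← outer_eq]
    rfl

-- ===== VERDICT (by name: the statement is the Claim_ definition above) =====
theorem oneStepKWayMerge_spec : Claim_equal_oneStepKWayMerge := by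
  intro L _
  unfold Spec_oneStepKWayMerge
  exact main_eq L
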